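-- pv_equiv track=rewrite | github.com/YPYP333YPYP/Programmers | 프로그래머스/1/64061. 크레인 인형뽑기 게임/크레인 인형뽑기 게임.py | solution
-- ===== SOURCE A (Python) =====
-- def solution(board, moves):
--     answer = 0
--     stack = []
--     board_v2 = [[] for _ in range(len(board))]
--     for v in range(len(board)-1, -1, -1):
--         for p in range(len(board)):
--             board_v2[p].append(board[v][p])
--
--     for v in moves:
--         while True:
--             if len(board_v2[v-1]) == 0:
--                 tmp = 0
--                 break
--             else:
--                 tmp = board_v2[v-1].pop()
--                 if tmp != 0:
--                     break
--         if tmp != 0: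
--             if len(stack) == 0:
--                 stack.append(tmp)
--
--             else:
--                 if stack[-1] == tmp:
--                     stack.pop()
--                     answer+=2
--                 else:
--                     stack.append(tmp)
--
--
--     return answer
-- ===== SOURCE B (Python) =====
-- def solution(board, moves):
--     grid = [row[:] for row in board]
--     answer = 0
--     stack = []
--     for v in moves:
--         tmp = 0
--         for r in range(len(grid)):
--             if grid[r][v-1] != 0:
--                 tmp = grid[r][v-1]
--                 grid[r][v-1] = 0
--                 break
--         if tmp != 0:
--             if stack and stack[-1] == tmp:
--                 stack.pop()
--                 answer += 2
--             else:
--                 stack.append(tmp)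
--     return answer
-- ===== Notes on version B (the rewrite author's own statement) =====
-- stated objective: idiomatic
-- what changed: B drops A's transpose-into-column-stacks preprocessing and its pop-until-nonzero while loop: it works on a copy of the grid directly, scanning each requested column top-down for the first nonzero cell and zeroing it, feeding that value into the same matching stack.
-- outside the precondition, e.g. on solution([[1, 2, 2], [4, 2, 6]], [0, 0]): A returns 2, B returns 0
import Mathlib
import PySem

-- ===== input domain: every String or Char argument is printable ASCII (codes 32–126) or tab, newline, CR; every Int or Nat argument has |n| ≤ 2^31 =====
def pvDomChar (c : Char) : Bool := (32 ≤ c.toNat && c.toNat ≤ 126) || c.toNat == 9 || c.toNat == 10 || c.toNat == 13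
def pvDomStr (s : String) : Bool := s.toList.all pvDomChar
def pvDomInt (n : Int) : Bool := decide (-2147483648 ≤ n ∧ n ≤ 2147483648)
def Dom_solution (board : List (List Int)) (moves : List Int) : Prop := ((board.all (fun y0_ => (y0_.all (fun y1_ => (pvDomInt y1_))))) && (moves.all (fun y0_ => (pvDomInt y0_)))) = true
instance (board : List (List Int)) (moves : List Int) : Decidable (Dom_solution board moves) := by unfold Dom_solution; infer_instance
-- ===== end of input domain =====

-- B replaces A's transpose-into-column-stacks + pop-until-nonzero loop by a direct
-- top-down scan of each requested column on the grid itself (B copies the board; neither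
-- port mutates, so only return values are compared).


-- ===== PORT A =====
-- board_v2[p] after the two transposing loops: board[v][p] for v = len(board)-1 .. 0
def pvA_col (board : List (List Int)) (p : Int) : List Int :=
  (PySem.List.pyRange ((board.length : Int) - 1) (-1) (-1)).map
    (fun v => PySem.List.pyGetD (PySem.List.pyGetD board v []) p 0)

-- the 'while True' pop loop: pop from the end until a nonzero value or the column is empty
def pvA_draw (col : List Int) : Int × List Int :=
  if h : col = [] then (0, [])
  else
    let tmp := col.getLast h
    if tmp != 0 then (tmp, col.dropLast)
    else pvA_draw col.dropLast
termination_by col.length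
decreasing_by
  have : col.length ≠ 0 := fun hz => h (List.eq_nil_of_length_eq_zero hz)
  simp [List.length_dropLast]; omega

-- one iteration of 'for v in moves' (state: answer, stack with top at head, board_v2)
def pvA_move (st : Int × List Int × List (List Int)) (v : Int) :
    Int × List Int × List (List Int) :=
  let (answer, stack, bv2) := st
  let (tmp, col') := pvA_draw (PySem.List.pyGetD bv2 (v - 1) [])
  let bv2' := PySem.List.pySetD bv2 (v - 1) col'
  if tmp != 0 then
    match stack with
    | [] => (answer, [tmp], bv2')
    | s :: rest =>
      if s = tmp then (answer + 2, rest, bv2')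
      else (answer, tmp :: s :: rest, bv2')
  else (answer, stack, bv2')

def solution (board : List (List Int)) (moves : List Int) : Int :=
  let board_v2 := (List.range board.length).map (fun (p : Nat) => pvA_col board (p : Int))
  (moves.foldl pvA_move (0, ([], board_v2))).1

-- ===== PORT B =====
-- scan rows from the top for the first nonzero cell in column c; zero it in place
def pvB_take (grid : List (List Int)) (c : Int) : Int × List (List Int) :=
  match grid with
  | [] => (0, [])
  | row :: rest =>
    let x := PySem.List.pyGetD row c 0
    if x != 0 then (x, PySem.List.pySetD row c 0 :: rest)
    else
      let (t, rest') := pvB_take rest c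
      (t, row :: rest')

-- one iteration of B's 'for v in moves'
def pvB_move (st : Int × List Int × List (List Int)) (v : Int) :
    Int × List Int × List (List Int) :=
  let (answer, stack, grid) := st
  let (tmp, grid') := pvB_take grid (v - 1)
  if tmp != 0 then
    match stack with
    | s :: rest =>
      if s = tmp then (answer + 2, rest, grid')
      else (answer, tmp :: s :: rest, grid')
    | [] => (answer, [tmp], grid')
  else (answer, stack, grid')

def solution_alt (board : List (List Int)) (moves : List Int) : Int :=
  (moves.foldl pvB_move (0, ([], board))).1

-- ===== PRECONDITION & SPEC =====
-- Pre_ excludes boards with a row shorter than the number of rows (A raises IndexError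
-- while transposing), moves outside range(1-len(board), len(board)+1) (A raises
-- IndexError), and the combination of a nonpositive move with a row longer than the
-- board, where Python's negative-index wraparound lands A (which wraps in the
-- transposed square) and B (which wraps in the raw row) on different cells — an
-- accidental corner of A's representation on which either value is defensible.
def Pre_solution (board : List (List Int)) (moves : List Int) : Prop :=
  (∀ row ∈ board, board.length ≤ row.length) ∧
  (∀ v ∈ moves, 1 - (board.length : Int) ≤ v ∧ v ≤ (board.length : Int)) ∧
  ((∃ v ∈ moves, v ≤ 0) → ∀ row ∈ board, row.length = board.length)
instance (board : List (List Int)) (moves : List Int) : Decidable (Pre_solution board moves) := by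
  unfold Pre_solution; infer_instance

def pvWitness_solution : List (List Int) × List Int :=
  ([[0, 0, 1], [0, 1, 2], [4, 2, 4]], [1, 3, 2, 3, 2, 3, 1])

def Spec_solution (board : List (List Int)) (moves : List Int) (out : Int) : Prop := out = solution_alt board moves
instance (board : List (List Int)) (moves : List Int) (out : Int) : Decidable (Spec_solution board moves out) := by unfold Spec_solution; infer_instance

-- ===== CLAIM (what is proved, stated in full; the proofs are below) =====
def Claim_equal_solution : Prop := ∀ (board : List (List Int)) (moves : List Int), Dom_solution board moves → Pre_solution board moves → Spec_solution board moves (solution board moves)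

-- ===== LEMMAS AND PROOFS =====

-- the column of the grid at index c, read top to bottom
def pvColAt (grid : List (List Int)) (c : Int) : List Int :=
  grid.map (fun row => PySem.List.pyGetD row c 0)

-- abstraction of A's column stack: the not-yet-drawn nonzero values, next first
def pvAbsA (col : List Int) : List Int := col.reverse.filter (· != 0)

-- abstraction of B's grid column
def pvAbsB (grid : List (List Int)) (c : Int) : List Int := (pvColAt grid c).filter (· != 0)

-- the common shape of the two move steps once the drawn value and the new board are known
def pvRes (answer : Int) (stack : List Int) (tmp : Int) (b : List (List Int)) :
    Int × List Int × List (List Int) :=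
  if tmp != 0 then
    match stack with
    | [] => (answer, [tmp], b)
    | s :: rest => if s = tmp then (answer + 2, rest, b) else (answer, tmp :: s :: rest, b)
  else (answer, stack, b)

lemma pvAbsB_cons (row : List Int) (rest : List (List Int)) (c : Int) :
    pvAbsB (row :: rest) c =
      if PySem.List.pyGetD row c 0 = 0 then pvAbsB rest c
      else PySem.List.pyGetD row c 0 :: pvAbsB rest c := by
  by_cases h : PySem.List.pyGetD row c 0 = 0 <;> simp [pvAbsB, pvColAt, h]

lemma pvA_draw_spec (col : List Int) :
    (pvA_draw col).1 = (pvAbsA col).headD 0 ∧ pvAbsA (pvA_draw col).2 = (pvAbsA col).tail := by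
  induction col using List.reverseRecOn with
  | nil => simp [pvA_draw, pvAbsA]
  | append_singleton xs x ih =>
    have hne : xs ++ [x] ≠ [] := by simp
    rw [pvA_draw, dif_neg hne]
    by_cases hx : x = 0
    · subst hx
      simpa [pvAbsA] using ih
    · simp [pvAbsA, hx]

lemma pvB_take_spec (grid : List (List Int)) (c : Int) (hc : 0 ≤ c)
    (hlen : ∀ row ∈ grid, c < (row.length : Int)) :
    (pvB_take grid c).1 = (pvAbsB grid c).headD 0 ∧
    pvAbsB (pvB_take grid c).2 c = (pvAbsB grid c).tail ∧
    (∀ c', 0 ≤ c' → c' ≠ c → pvAbsB (pvB_take grid c).2 c' = pvAbsB grid c') ∧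
    ((pvB_take grid c).2).map List.length = grid.map List.length := by
  lift c to ℕ using hc with k
  induction grid with
  | nil => simp [pvB_take, pvAbsB, pvColAt]
  | cons row rest ih =>
    obtain ⟨h1, h2, h3, h4⟩ := ih (fun r hr => hlen r (List.mem_cons_of_mem _ hr))
    have hcr : k < row.length := by
      have := hlen row List.mem_cons_self; exact_mod_cast this
    by_cases hx : PySem.List.pyGetD row (k : Int) 0 = 0
    · have hx' : (row[k]?.getD 0 : Int) = 0 := by
        simpa [List.getD_eq_getElem?_getD] using hx
      have hred : pvB_take (row :: rest) (k : Int) =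
          ((pvB_take rest (k : Int)).1, row :: (pvB_take rest (k : Int)).2) := by
        rcases hpr : pvB_take rest (k : Int) with ⟨t, r'⟩
        simp [pvB_take, hx', hpr]
      rw [hred]
      refine ⟨?_, ?_, ?_, ?_⟩
      · rw [pvAbsB_cons, if_pos hx]; exact h1
      · rw [pvAbsB_cons (c := (k : Int)), if_pos hx, pvAbsB_cons, if_pos hx]; exact h2
      · intro c' hc' hne
        rw [pvAbsB_cons, pvAbsB_cons, h3 c' hc' hne]
      · simpa using h4
    · have hx' : ¬ (row[k]?.getD 0 : Int) = 0 := by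
        simpa [List.getD_eq_getElem?_getD] using hx
      have hred : pvB_take (row :: rest) (k : Int) =
          (PySem.List.pyGetD row (k : Int) 0, PySem.List.pySetD row (k : Int) 0 :: rest) := by
        simp [pvB_take, hx']
      rw [hred]
      have hset : PySem.List.pySetD row (k : Int) (0 : Int) = row.set k 0 := by
        simp
      have hget0 : PySem.List.pyGetD (row.set k 0) (k : Int) 0 = 0 := by
        rw [PySem.List.pyGetD_natCast]
        simp [List.getD_eq_getElem?_getD, hcr]
      refine ⟨?_, ?_, ?_, ?_⟩
      · rw [pvAbsB_cons, if_neg hx]; simp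
      · rw [hset, pvAbsB_cons, if_pos hget0, pvAbsB_cons, if_neg hx, List.tail_cons]
      · intro c' hc' hne
        lift c' to ℕ using hc' with k'
        have hk' : k' ≠ k := fun h => hne (by exact_mod_cast h)
        have hgx : PySem.List.pyGetD (row.set k 0) (k' : Int) 0 = PySem.List.pyGetD row (k' : Int) 0 := by
          rw [PySem.List.pyGetD_natCast, PySem.List.pyGetD_natCast]
          simp [List.getD_eq_getElem?_getD, List.getElem?_set_ne (fun h => hk' h.symm)]
      

        rw [hset, pvAbsB_cons, hgx, pvAbsB_cons]
      · simp

-- Python negative-index wraparound: index i with -len ≤ i < 0 is index i + len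
lemma pvIdx_wrap (n : Nat) (i : Int) (h1 : -(n : Int) ≤ i) (h2 : i < 0) :
    PySem.List.pyIdx? n i = PySem.List.pyIdx? n (i + n) := by
  simp only [PySem.List.pyIdx?]
  rw [if_neg (by omega), if_pos h1, if_pos (by omega : (0 : Int) ≤ i + n),
      if_pos (by omega : i + (n : Int) < n)]
  congr 1
  omega

lemma pvGetD_wrap {α : Type} (xs : List α) (i : Int) (d : α)
    (h1 : -(xs.length : Int) ≤ i) (h2 : i < 0) :
    PySem.List.pyGetD xs i d = PySem.List.pyGetD xs (i + xs.length) d := by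
  simp only [PySem.List.pyGetD, PySem.List.pyGet?, pvIdx_wrap xs.length i h1 h2]

lemma pvSetD_wrap {α : Type} (xs : List α) (i : Int) (v : α)
    (h1 : -(xs.length : Int) ≤ i) (h2 : i < 0) :
    PySem.List.pySetD xs i v = PySem.List.pySetD xs (i + xs.length) v := by
  simp only [PySem.List.pySetD, PySem.List.pySet?, pvIdx_wrap xs.length i h1 h2]

lemma pvA_move_wrap (answer : Int) (stack : List Int) (bv2 : List (List Int)) (n : Nat)
    (v : Int) (hlen : bv2.length = n) (h1 : 1 - (n : Int) ≤ v) (h2 : v ≤ 0) :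
    pvA_move (answer, stack, bv2) v = pvA_move (answer, stack, bv2) (v + n) := by
  have hg := pvGetD_wrap bv2 (v - 1) ([] : List Int) (by rw [hlen]; omega) (by omega)
  have hs : ∀ col, PySem.List.pySetD bv2 (v - 1) col = PySem.List.pySetD bv2 (v + n - 1) col := by
    intro col
    have := pvSetD_wrap bv2 (v - 1) col (by rw [hlen]; omega) (by omega)
    simpa [hlen, show v - 1 + (n : Int) = v + n - 1 from by ring] using this
  rw [hlen, show v - 1 + (n : Int) = v + n - 1 from by ring] at hg
  simp only [pvA_move, hg, hs]

lemma pvB_take_wrap (g : List (List Int)) (n : Nat) (c : Int)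
    (hrows : ∀ row ∈ g, row.length = n) (h1 : -(n : Int) ≤ c) (h2 : c < 0) :
    pvB_take g c = pvB_take g (c + n) := by
  induction g with
  | nil => rfl
  | cons row rest ih =>
    have hr : row.length = n := hrows row List.mem_cons_self
    have hg := pvGetD_wrap row c (0 : Int) (by rw [hr]; omega) h2
    have hs := pvSetD_wrap row c (0 : Int) (by rw [hr]; omega) h2
    rw [hr] at hg hs
    simp only [pvB_take, hg, hs, ih (fun r hr' => hrows r (List.mem_cons_of_mem _ hr'))]

lemma pvB_move_wrap (answer : Int) (stack : List Int) (grid : List (List Int)) (n : Nat)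
    (v : Int) (hrows : ∀ row ∈ grid, row.length = n) (h1 : 1 - (n : Int) ≤ v) (h2 : v ≤ 0) :
    pvB_move (answer, stack, grid) v = pvB_move (answer, stack, grid) (v + n) := by
  have ht := pvB_take_wrap grid n (v - 1) hrows (by omega) (by omega)
  rw [show v - 1 + (n : Int) = v + n - 1 from by ring] at ht
  simp only [pvB_move, ht]

-- transfer of per-row lengths along an unchanged length profile
lemma pvLenEq (n : Nat) (g2 grid : List (List Int))
    (h : g2.map List.length = grid.map List.length)
    (hex : ∀ r ∈ grid, r.length = n) : ∀ r ∈ g2, r.length = n := by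
  intro r hr
  have hmem : r.length ∈ g2.map List.length := List.mem_map_of_mem hr
  rw [h] at hmem
  obtain ⟨r0, hr0, hl0⟩ := List.mem_map.mp hmem
  rw [← hl0]; exact hex r0 hr0

-- the invariant tying A's column stacks to B's grid
def pvInv (n : Nat) (bv2 grid : List (List Int)) : Prop :=
  bv2.length = n ∧ (∀ row ∈ grid, n ≤ row.length) ∧
  (∀ c : Int, 0 ≤ c → c < (n : Int) →
    pvAbsA (PySem.List.pyGetD bv2 c []) = pvAbsB grid c)

lemma pvInv_init (board : List (List Int)) (h : ∀ row ∈ board, board.length ≤ row.length) :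
    pvInv board.length ((List.range board.length).map (fun (p : Nat) => pvA_col board (p : Int))) board := by
  refine ⟨by simp, h, ?_⟩
  intro c hc0 hcn
  lift c to ℕ using hc0 with k
  have hck : k < board.length := by exact_mod_cast hcn
  have hcol : PySem.List.pyGetD ((List.range board.length).map (fun (p : Nat) => pvA_col board (p : Int)))
      (k : Int) [] = pvA_col board (k : Int) := by
    rw [PySem.List.pyGetD_natCast, List.getD_eq_getElem?_getD,
        List.getElem?_map, List.getElem?_range hck]
    rfl
  rw [hcol]
  unfold pvA_col
  have hr : PySem.List.pyRange ((board.length : Int) - 1) (-1) (-1)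
      = (PySem.List.pyRange 0 (board.length : Int) 1).reverse := by
    have := PySem.List.pyRange_neg_one_eq_reverse ((board.length : Int) - 1) (-1)
    simpa using this
  rw [hr, List.map_reverse]
  have hmap : (PySem.List.pyRange 0 (board.length : Int) 1).map
      (fun v => PySem.List.pyGetD (PySem.List.pyGetD board v []) (k : Int) 0)
      = board.map (fun row => PySem.List.pyGetD row (k : Int) 0) := by
    rw [show (fun v => PySem.List.pyGetD (PySem.List.pyGetD board v []) (k : Int) 0)
        = (fun row => PySem.List.pyGetD row (k : Int) 0) ∘ (fun v => PySem.List.pyGetD board v [])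
        from rfl]
    rw [← List.map_map, PySem.List.map_pyGetD_pyRange_zero']
  rw [hmap]
  simp [pvAbsA, pvAbsB, pvColAt]

lemma pvStep (n : Nat) (answer : Int) (stack : List Int) (bv2 grid : List (List Int))
    (v : Int) (hv1 : 1 ≤ v) (hv2 : v ≤ (n : Int)) (hinv : pvInv n bv2 grid) :
    (pvA_move (answer, stack, bv2) v).1 = (pvB_move (answer, stack, grid) v).1 ∧
    (pvA_move (answer, stack, bv2) v).2.1 = (pvB_move (answer, stack, grid) v).2.1 ∧
    pvInv n (pvA_move (answer, stack, bv2) v).2.2 (pvB_move (answer, stack, grid) v).2.2 ∧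
    ((pvB_move (answer, stack, grid) v).2.2).map List.length = grid.map List.length := by
  obtain ⟨hlen, hrows, hcols⟩ := hinv
  have hc0 : (0 : Int) ≤ v - 1 := by omega
  have hcn : v - 1 < (n : Int) := by omega
  have hrowc : ∀ row ∈ grid, v - 1 < (row.length : Int) := by
    intro row hr; have := hrows row hr; omega
  obtain ⟨hA1, hA2⟩ := pvA_draw_spec (PySem.List.pyGetD bv2 (v - 1) [])
  obtain ⟨hB1, hB2, hB3, hB4⟩ := pvB_take_spec grid (v - 1) hc0 hrowc
  have habs := hcols (v - 1) hc0 hcn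
  rcases hDA : pvA_draw (PySem.List.pyGetD bv2 (v - 1) []) with ⟨tA, colA⟩
  rcases hDB : pvB_take grid (v - 1) with ⟨tB, gridB⟩
  rw [hDA] at hA1 hA2
  rw [hDB] at hB1 hB2 hB3 hB4
  simp only at hA1 hA2 hB1 hB2 hB3 hB4
  have htmp : tA = tB := by rw [hA1, hB1, habs]
  subst htmp
  have hinv' : pvInv n (PySem.List.pySetD bv2 (v - 1) colA) gridB := by
    refine ⟨by simp [hlen], ?_, ?_⟩
    · intro row hr
      have hmem : row.length ∈ gridB.map List.length := List.mem_map_of_mem hr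
      rw [hB4] at hmem
      obtain ⟨row0, hr0, hl0⟩ := List.mem_map.mp hmem
      rw [← hl0]; exact hrows row0 hr0
    · intro c'' h0 hn'
      obtain ⟨kc, hkc⟩ : ∃ m : ℕ, v - 1 = (m : Int) := ⟨(v - 1).toNat, by omega⟩
      obtain ⟨k'', hk''⟩ : ∃ m : ℕ, c'' = (m : Int) := ⟨c''.toNat, by omega⟩
      have hkcn : kc < n := by omega
      have hsetget : PySem.List.pyGetD (PySem.List.pySetD bv2 (v - 1) colA) c'' []
          = if c'' = v - 1 then colA else PySem.List.pyGetD bv2 c'' [] := by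
        rw [hkc, hk'', PySem.List.pySetD_natCast, PySem.List.pyGetD_natCast]
        by_cases he : k'' = kc
        · subst he
          rw [if_pos rfl, List.getD_eq_getElem?_getD]
          have : k'' < bv2.length := by omega
          simp [this]
        · rw [if_neg (by exact_mod_cast he), PySem.List.pyGetD_natCast,
              List.getD_eq_getElem?_getD, List.getD_eq_getElem?_getD,
              List.getElem?_set_ne (fun h => he h.symm)]
      rw [hsetget]
      by_cases he : c'' = v - 1
      · rw [if_pos he, he, hA2, hB2, habs]
      · rw [if_neg he, hB3 c'' h0 he]
        exact hcols c'' h0 hn'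
  have hAeq : pvA_move (answer, stack, bv2) v
      = pvRes answer stack tA (PySem.List.pySetD bv2 (v - 1) colA) := by
    simp only [pvA_move, hDA, pvRes]
  have hBeq : pvB_move (answer, stack, grid) v = pvRes answer stack tA gridB := by
    simp only [pvB_move, hDB, pvRes]
    cases stack <;> rfl
  rw [hAeq, hBeq]
  unfold pvRes
  by_cases ht : (tA != 0) = true
  · rw [if_pos ht, if_pos ht]
    cases stack with
    | nil => exact ⟨rfl, rfl, hinv', hB4⟩
    | cons s rest =>
      by_cases hs : s = tA
      · simp only [if_pos hs]; exact ⟨by trivial, by trivial, hinv', hB4⟩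
      · simp only [if_neg hs]; exact ⟨by trivial, by trivial, hinv', hB4⟩
  · rw [if_neg ht, if_neg ht]; exact ⟨rfl, rfl, hinv', hB4⟩

lemma pvFold (n : Nat) (moves : List Int)
    (hm : ∀ v ∈ moves, 1 - (n : Int) ≤ v ∧ v ≤ (n : Int))
    (answer : Int) (stack : List Int) (bv2 grid : List (List Int)) (hinv : pvInv n bv2 grid)
    (hsq : (∃ v ∈ moves, v ≤ 0) → ∀ row ∈ grid, row.length = n) :
    (moves.foldl pvA_move (answer, stack, bv2)).1 =
    (moves.foldl pvB_move (answer, stack, grid)).1 := by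
  induction moves generalizing answer stack bv2 grid with
  | nil => rfl
  | cons v vs ih =>
    have hv := hm v List.mem_cons_self
    have hstep : ∃ v' : Int, 1 ≤ v' ∧ v' ≤ (n : Int) ∧
        pvA_move (answer, stack, bv2) v = pvA_move (answer, stack, bv2) v' ∧
        pvB_move (answer, stack, grid) v = pvB_move (answer, stack, grid) v' := by
      by_cases hneg : v ≤ 0
      · have hex : ∀ row ∈ grid, row.length = n :=
          hsq ⟨v, List.mem_cons_self, hneg⟩
        exact ⟨v + n, by omega, by omega,
          pvA_move_wrap answer stack bv2 n v hinv.1 (by omega) hneg,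
          pvB_move_wrap answer stack grid n v hex (by omega) hneg⟩
      · exact ⟨v, by omega, by omega, rfl, rfl⟩
    obtain ⟨v', hv1, hv2, hwA, hwB⟩ := hstep
    obtain ⟨h1, h2, h3, h4⟩ := pvStep n answer stack bv2 grid v' hv1 hv2 hinv
    simp only [List.foldl_cons, hwA, hwB]
    rcases hA : pvA_move (answer, stack, bv2) v' with ⟨a1, s1, b1⟩
    rcases hB : pvB_move (answer, stack, grid) v' with ⟨a2, s2, g2⟩
    rw [hA] at h1 h2 h3
    rw [hB] at h1 h2 h3 h4
    simp only at h1 h2 h3 h4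
    subst h1; subst h2
    refine ih (fun w hw => hm w (List.mem_cons_of_mem _ hw))
      a1 s1 b1 g2 h3 ?_
    intro hex'
    obtain ⟨w, hw, hw0⟩ := hex'
    exact pvLenEq n g2 grid h4 (hsq ⟨w, List.mem_cons_of_mem _ hw, hw0⟩)

-- ===== VERDICT (by name: the statement is the Claim_ definition above) =====
theorem solution_spec : Claim_equal_solution := by
  intro board moves _ hpre
  unfold Spec_solution solution solution_alt
  exact pvFold board.length moves hpre.2.1 0 [] _ board
    (pvInv_init board hpre.1) hpre.2.2
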